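-- pv_equiv track=rewrite | github.com/ftomassetti/langgen | langgen/langgen.py | _count_with_prefix
-- ===== SOURCE A (Python) =====
-- def _count_with_prefix(syllables, prefix, sample):
-- 	combinations = []
-- 	total = 0
-- 	for (index, syl) in enumerate(syllables):
-- 		count = sample.count(prefix + syl)
-- 		if count != 0:
-- 			total += count
-- 			combinations.append([index, total])
-- 	return combinations
-- ===== SOURCE B (Python) =====
-- def _count_with_prefix(syllables, prefix, sample):
--     # Different algorithm: instead of rescanning the sample once per syllable
--     # with str.count, make ONE left-to-right pass over the sample positions,
--     # advancing the greedy (non-overlapping) match state of every distinct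
--     # key prefix+syllable simultaneously; then one cumulative pass emits the
--     # [index, running_total] pairs.
--     keys = list(dict.fromkeys(prefix + syl for syl in syllables))
--     state = [[0, 0] for _ in keys]      # per key: [matches, next allowed position]
--     pairs = list(zip(keys, state))
--     n = len(sample)
--     starts = sample.startswith
--     for i in range(n + 1):
--         for key, st in pairs:
--             if st[1] <= i and starts(key, i):
--                 st[0] += 1
--                 st[1] = i + len(key)
--     counts = {key: st[0] for key, st in pairs}
--     result = []
--     total = 0
--     for index, syl in enumerate(syllables):
--         c = counts[prefix + syl]
--         if c != 0:
--             total += c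
--             result.append([index, total])
--     return result
-- ===== Notes on version B (the rewrite author's own statement) =====
-- stated objective: alternative
-- what changed: B replaces A's per-syllable rescans of the sample (str.count called once per syllable) by a single left-to-right pass over the sample positions that advances the greedy non-overlapping match state of every distinct key prefix+syllable simultaneously, then one cumulative pass emits the [index, running total] pairs; it trades the speed of CPython's C-level str.count scan for an interpreter-level loop, so it is not faster in wall-clock terms.
import Mathlib
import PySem

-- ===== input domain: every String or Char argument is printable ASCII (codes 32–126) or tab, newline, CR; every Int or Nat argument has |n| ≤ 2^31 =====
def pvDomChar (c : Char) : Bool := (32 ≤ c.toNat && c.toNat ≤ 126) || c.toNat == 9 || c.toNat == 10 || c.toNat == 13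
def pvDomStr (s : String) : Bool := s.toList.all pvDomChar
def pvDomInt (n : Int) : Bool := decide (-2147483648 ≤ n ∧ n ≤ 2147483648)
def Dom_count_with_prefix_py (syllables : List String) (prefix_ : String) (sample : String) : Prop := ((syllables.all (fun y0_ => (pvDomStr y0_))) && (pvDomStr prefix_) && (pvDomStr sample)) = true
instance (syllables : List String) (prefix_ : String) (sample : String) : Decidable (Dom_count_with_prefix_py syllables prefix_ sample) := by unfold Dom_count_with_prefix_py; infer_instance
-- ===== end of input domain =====

-- B replaces A's per-syllable rescans of the sample (str.count once per syllable) by ONE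
-- left-to-right pass over the sample's positions that advances the greedy non-overlapping
-- match state of every distinct key simultaneously; same return value (alternative algorithm).

-- ===== PORT A =====
def count_with_prefix_py (syllables : List String) (prefix_ : String) (sample : String) : List (List Int) :=
  (((PySem.List.enumerate syllables 0).foldl
      (fun (st : List (List Int) × Int) (p : Int × String) =>
        let count : Int := (PySem.Str.count sample (prefix_ ++ p.2) : Int)
        if count ≠ 0 then (st.1 ++ [[p.1, st.2 + count]], st.2 + count) else st)
      ([], 0))).1

-- ===== PORT B =====
-- the body of B's inner loop: one key's greedy match state (matches, next allowed position)
-- advanced at sample position i.  Python's sample.startswith(key, i) (0 ≤ i ≤ len(sample))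
-- is ported by hand as: key is a prefix of the sample's suffix starting at i (exact there).
def cwpKeyStep (sample : String) (i : Int) (key : String) (st : Int × Int) : Int × Int :=
  if st.2 ≤ i ∧ PySem.Chars.startswith (sample.toList.drop i.toNat) key.toList = true
  then (st.1 + 1, i + PySem.Str.len key) else st

def count_with_prefix_py_alt (syllables : List String) (prefix_ : String) (sample : String) : List (List Int) :=
  -- keys = list(dict.fromkeys(prefix + syl for syl in syllables))
  let keys := PySem.List.dedup (syllables.map (fun syl => prefix_ ++ syl))
  -- pairs = list(zip(keys, state)), state = [[0, 0] for _ in keys]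
  let pairs0 := keys.zip (keys.map (fun _ => ((0 : Int), (0 : Int))))
  let n : Int := PySem.Str.len sample
  -- one pass over the positions 0..n, each position advancing every key's state
  let pairs := (PySem.List.pyRange 0 (n + 1)).foldl
      (fun (pairs : List (String × (Int × Int))) (i : Int) =>
        pairs.map (fun ks => (ks.1, cwpKeyStep sample i ks.1 ks.2)))
      pairs0
  -- counts = {key: st[0] for key, st in pairs}
  let counts : PySem.Dict String Int :=
      pairs.foldl (fun d ks => d.insert ks.1 ks.2.1) PySem.Dict.empty
  -- cumulative pass (counts[prefix+syl] never raises: every key was inserted above,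
  -- so the port's default 0 is never used)
  (((PySem.List.enumerate syllables 0).foldl
      (fun (st : List (List Int) × Int) (p : Int × String) =>
        let c : Int := counts.getD (prefix_ ++ p.2) 0
        if c ≠ 0 then (st.1 ++ [[p.1, st.2 + c]], st.2 + c) else st)
      ([], 0))).1

-- ===== PRECONDITION & SPEC =====
def Spec_count_with_prefix_py (syllables : List String) (prefix_ : String) (sample : String) (out : List (List Int)) : Prop := out = count_with_prefix_py_alt syllables prefix_ sample
instance (syllables : List String) (prefix_ : String) (sample : String) (out : List (List Int)) : Decidable (Spec_count_with_prefix_py syllables prefix_ sample out) := by unfold Spec_count_with_prefix_py; infer_instance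

-- ===== CLAIM (what is proved, stated in full; the proofs are below) =====
def Claim_equal_count_with_prefix_py : Prop := ∀ (syllables : List String) (prefix_ : String) (sample : String), Dom_count_with_prefix_py syllables prefix_ sample → Spec_count_with_prefix_py syllables prefix_ sample (count_with_prefix_py syllables prefix_ sample)

-- ===== LEMMAS AND PROOFS =====

-- the step at a Nat position, phrased through isPrefixOf on the character lists
theorem cwpKeyStep_natCast (sample key : String) (p : Nat) (st : Int × Int) :
    cwpKeyStep sample (p : Nat) key st =
      if st.2 ≤ (p : Int) ∧ key.toList.isPrefixOf (sample.toList.drop p) = true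
      then (st.1 + 1, (p : Int) + (key.toList.length : Int)) else st := by
  unfold cwpKeyStep
  rw [show PySem.Str.len key = ((key.toList.length : Nat) : Int) by simp [PySem.Str.len_eq]]
  rw [show ((p : Int)).toNat = p from Int.toNat_natCast p]
  exact if_congr (and_congr_right fun _ => by rw [PySem.Chars.startswith]) rfl rfl

-- skipping: while the next allowed position t lies ahead, positions below t change nothing
theorem cwp_skip (sample key : String) :
    ∀ (m q : Nat) (c : Int) (t : Nat), q ≤ t → t ≤ q + m →
      (List.range' q m).foldl (fun st (p : Nat) => cwpKeyStep sample (p : Int) key st) (c, (t : Int))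
        = (List.range' t (q + m - t)).foldl (fun st (p : Nat) => cwpKeyStep sample (p : Int) key st) (c, (t : Int)) := by
  intro m
  induction m with
  | zero =>
    intro q c t h1 h2
    have hqt : t = q := by omega
    subst hqt
    simp
  | succ m ih =>
    intro q c t h1 h2
    by_cases hq : q = t
    · subst hq
      rw [Nat.add_sub_cancel_left]
    · have hlt : q < t := lt_of_le_of_ne h1 hq
      rw [List.range'_succ, List.foldl_cons, cwpKeyStep_natCast]
      rw [if_neg (by
        rintro ⟨hle, -⟩
        have hle0 : (t : Int) ≤ (q : Int) := hle
        have hle' : t ≤ q := by exact_mod_cast hle0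
        omega)]
      rw [ih (q + 1) c t (by omega) (by omega)]
      have harg : q + 1 + m - t = q + (m + 1) - t := by omega
      rw [harg]

-- empty key: every position matches and the next-allowed pointer never moves forward
theorem cwp_nil (sample key : String) (hk : key.toList = []) :
    ∀ (m p : Nat) (c : Int) (t : Nat), t ≤ p →
      ((List.range' p m).foldl (fun st (q : Nat) => cwpKeyStep sample (q : Int) key st) (c, (t : Int))).1
        = c + (m : Int) := by
  intro m
  induction m with
  | zero => intro p c t _; simp
  | succ m ih =>
    intro p c t ht
    rw [List.range'_succ, List.foldl_cons, cwpKeyStep_natCast]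
    rw [if_pos ⟨show ((t : Int)) ≤ (p : Int) by exact_mod_cast ht, by simp [hk]⟩]
    have : ((p : Int) + ((key.toList.length : Nat) : Int)) = ((p : Nat) : Int) := by
      simp [hk]
    rw [this]
    rw [ih (p + 1) (c + 1) p (by omega)]
    push_cast; ring

-- the pure greedy non-overlapping counter, fuel-guarded
def gcnt (k : List Char) : Nat → List Char → Nat
  | 0, _ => 0
  | _ + 1, [] => 0
  | fuel + 1, h :: t => if k.isPrefixOf (h :: t) then gcnt k fuel ((h :: t).drop k.length) + 1
                        else gcnt k fuel t

theorem gcnt_nil_list (k : List Char) (fuel : Nat) : gcnt k fuel [] = 0 := by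
  cases fuel <;> simp [gcnt]

theorem gcnt_fuel (k : List Char) (hk : k ≠ []) :
    ∀ (fuel fuel' : Nat) (l : List Char), l.length ≤ fuel → l.length ≤ fuel' →
      gcnt k fuel l = gcnt k fuel' l := by
  intro fuel
  induction fuel with
  | zero =>
    intro fuel' l h _
    have : l = [] := List.eq_nil_of_length_eq_zero (by omega)
    subst this; simp [gcnt_nil_list, gcnt]
  | succ fuel ih =>
    intro fuel' l h h'
    cases l with
    | nil => simp [gcnt_nil_list]
    | cons x xs =>
      cases fuel' with
      | zero => simp at h'
      | succ fuel' =>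
        have hklen : 1 ≤ k.length := by
          cases k with | nil => exact absurd rfl hk | cons a b => simp
        simp only [gcnt]
        by_cases hp : k.isPrefixOf (x :: xs) = true
        · rw [if_pos hp, if_pos hp]
          have hdl : ((x :: xs).drop k.length).length ≤ fuel := by
            simp only [List.length_drop, List.length_cons]
            simp only [List.length_cons] at h
            omega
          have hdl' : ((x :: xs).drop k.length).length ≤ fuel' := by
            simp only [List.length_drop, List.length_cons]
            simp only [List.length_cons] at h'
            omega
          rw [ih fuel' _ hdl hdl']
        · rw [if_neg hp, if_neg hp]
          exact ih fuel' xs (by simpa using Nat.le_of_succ_le_succ (by simpa using h))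
            (by simpa using Nat.le_of_succ_le_succ (by simpa using h'))

-- PySem's str.count scanner equals the pure greedy counter
theorem count_go_eq (k : List Char) (hk : k ≠ []) :
    ∀ (fuel : Nat) (l : List Char) (acc : Nat), l.length ≤ fuel →
      PySem.Chars.count.go k fuel l acc = acc + gcnt k fuel l := by
  intro fuel
  induction fuel with
  | zero =>
    intro l acc h
    have : l = [] := List.eq_nil_of_length_eq_zero (by omega)
    subst this; simp [PySem.Chars.count.go, gcnt]
  | succ fuel ih =>
    intro l acc h
    cases l with
    | nil => simp [PySem.Chars.count.go, gcnt_nil_list]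
    | cons x xs =>
      have hklen : 1 ≤ k.length := by
        cases k with | nil => exact absurd rfl hk | cons a b => simp
      simp only [PySem.Chars.count.go, gcnt]
      by_cases hp : k.isPrefixOf (x :: xs) = true
      · rw [if_pos hp, if_pos hp]
        have hdl : ((x :: xs).drop k.length).length ≤ fuel := by
          simp only [List.length_drop, List.length_cons]
          simp only [List.length_cons] at h
          omega
        rw [ih _ _ hdl]
        omega
      · rw [if_neg hp, if_neg hp]
        rw [ih xs acc (by simpa using Nat.le_of_succ_le_succ (by simpa using h))]

-- main invariant: folding a nonempty key's step over the remaining positions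
-- counts exactly the greedy matches in the corresponding suffix of the sample
theorem cwp_main (sample key : String) (hk : key.toList ≠ []) :
    ∀ (m p : Nat) (c : Int) (t : Nat), t ≤ p → p + m = sample.toList.length + 1 →
      ((List.range' p m).foldl (fun st (q : Nat) => cwpKeyStep sample (q : Int) key st) (c, (t : Int))).1
        = c + (gcnt key.toList (sample.toList.length - p) (sample.toList.drop p) : Int) := by
  intro m
  induction m using Nat.strong_induction_on with
  | _ m ih =>
    intro p c t ht hpm
    cases m with
    | zero =>
      have hd : sample.toList.drop p = [] := by
        apply List.drop_eq_nil_of_le; omega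
      simp [hd, gcnt_nil_list]
    | succ m =>
      have hklen : 1 ≤ key.toList.length := by
        cases hke : key.toList with
        | nil => exact absurd hke hk
        | cons a b => simp
      rw [List.range'_succ, List.foldl_cons, cwpKeyStep_natCast]
      by_cases hp : key.toList.isPrefixOf (sample.toList.drop p) = true
      · rw [if_pos ⟨show ((t : Int)) ≤ (p : Int) by exact_mod_cast ht, hp⟩]
        -- a match at p: count it and jump to p + |key|
        have hpre : key.toList <+: sample.toList.drop p := by
          rwa [List.isPrefixOf_iff_prefix] at hp
        have hlenle : key.toList.length ≤ sample.toList.length - p :=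
          le_trans hpre.length_le (by simp)
        have hplt : p < sample.toList.length := by
          by_contra hno
          have : sample.toList.drop p = [] := List.drop_eq_nil_of_le (by omega)
          rw [this] at hpre
          exact hk (List.prefix_nil.mp hpre)
        have hple : p + key.toList.length ≤ sample.toList.length := by omega
        have hcast : ((p : Int) + (key.toList.length : Int)) = (((p + key.toList.length : Nat)) : Int) := by
          push_cast; ring
        rw [hcast]
        rw [cwp_skip sample key m (p + 1) (c + 1) (p + key.toList.length) (by omega) (by omega)]
        have hm' : p + 1 + m - (p + key.toList.length) = sample.toList.length + 1 - (p + key.toList.length) := by omega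
        rw [hm']
        rw [ih (sample.toList.length + 1 - (p + key.toList.length)) (by omega)
            (p + key.toList.length) (c + 1) (p + key.toList.length) le_rfl (by omega)]
        -- now reduce the RHS gcnt one step
        cases hd : sample.toList.drop p with
        | nil => rw [hd] at hpre; exact absurd (List.prefix_nil.mp hpre) hk
        | cons x xs =>
          have hnp : sample.toList.length - p = (sample.toList.length - (p + 1)) + 1 := by omega
          rw [hnp]
          rw [hd] at hp
          simp only [gcnt, if_pos hp]
          have hdd : (x :: xs).drop key.toList.length = sample.toList.drop (p + key.toList.length) := by
            rw [← hd, List.drop_drop, Nat.add_comm]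
          rw [hdd]
          have hflen : (sample.toList.drop (p + key.toList.length)).length ≤ sample.toList.length - (p + 1) := by
            simp only [List.length_drop]; omega
          rw [gcnt_fuel key.toList hk (sample.toList.length - (p + 1))
              (sample.toList.length - (p + key.toList.length)) _ hflen (by simp)]
          push_cast; ring
      · rw [if_neg (by intro hcon; exact hp hcon.2)]
        by_cases hpn : p < sample.toList.length
        · rw [ih m (by omega) (p + 1) c t (by omega) (by omega)]
          cases hd : sample.toList.drop p with
          | nil =>
            exfalso
            have := congrArg List.length hd
            simp only [List.length_drop, List.length_nil] at this
            omega
          | cons x xs =>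
            have hnp : sample.toList.length - p = (sample.toList.length - (p + 1)) + 1 := by omega
            rw [hnp]
            rw [hd] at hp
            simp only [gcnt, if_neg hp]
            have hxs : xs = sample.toList.drop (p + 1) := by
              have := congrArg (List.drop 1) hd
              simpa [List.drop_drop, Nat.add_comm] using this.symm
            rw [hxs]
        · -- p = n: the last position never matches a nonempty key; both sides vanish
          have hpn' : p = sample.toList.length := by omega
          have hm0 : m = 0 := by omega
          subst hm0
          have hd : sample.toList.drop (p + 1) = [] := List.drop_eq_nil_of_le (by omega)
          have hd2 : sample.toList.drop p = [] := List.drop_eq_nil_of_le (by omega)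
          simp [hpn']

-- the per-key position pass computes exactly Python's sample.count(key)
theorem cwp_key_count (sample key : String) :
    ((PySem.List.pyRange 0 ((PySem.Str.len sample) + 1)).foldl
        (fun st i => cwpKeyStep sample i key st) ((0 : Int), (0 : Int))).1
      = (PySem.Str.count sample key : Int) := by
  have hrange : PySem.List.pyRange 0 ((PySem.Str.len sample) + 1)
      = List.map (fun (k : Nat) => (k : Int)) (List.range' 0 (sample.toList.length + 1)) := by
    rw [show (PySem.Str.len sample) + 1 = (((sample.toList.length + 1 : Nat)) : Int) by
      simp [PySem.Str.len_eq]]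
    rw [PySem.List.pyRange_zero_natCast, List.range_eq_range']
  rw [hrange, List.foldl_map]
  have hcount : PySem.Str.count sample key = PySem.Chars.count sample.toList key.toList := by
    simp [PySem.Str.count_eq]
  rw [hcount]
  by_cases hk : key.toList = []
  · have h0 : ((0 : Int), (0 : Int)) = ((0 : Int), ((0 : Nat) : Int)) := by norm_num
    rw [h0, cwp_nil sample key hk (sample.toList.length + 1) 0 0 0 le_rfl]
    rw [PySem.Chars.count, if_pos (by simp [hk])]
    push_cast; ring
  · have h0 : ((0 : Int), (0 : Int)) = ((0 : Int), ((0 : Nat) : Int)) := by norm_num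
    rw [h0, cwp_main sample key hk (sample.toList.length + 1) 0 0 0 le_rfl (by omega)]
    rw [PySem.Chars.count, if_neg (by simp [hk])]
    rw [count_go_eq key.toList hk sample.toList.length sample.toList 0 le_rfl]
    simp

-- the map pass over the whole pairs list is the per-key pass, keywise
theorem cwp_state_eq (sample : String) (keys : List String) :
    ∀ (l : List Int) (g : String → Int × Int),
      l.foldl (fun (pairs : List (String × (Int × Int))) (i : Int) =>
          pairs.map (fun ks => (ks.1, cwpKeyStep sample i ks.1 ks.2)))
        (keys.map (fun k => (k, g k)))
      = keys.map (fun k => (k, l.foldl (fun st i => cwpKeyStep sample i k st) (g k))) := by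
  intro l
  induction l with
  | nil => intro g; simp
  | cons i rest ih =>
    intro g
    rw [List.foldl_cons, List.map_map]
    have hcomp : ((fun ks : String × (Int × Int) => (ks.1, cwpKeyStep sample i ks.1 ks.2)) ∘
        fun k => (k, g k)) = fun k => (k, cwpKeyStep sample i k (g k)) := rfl
    rw [hcomp, ih (fun k => cwpKeyStep sample i k (g k))]
    simp only [List.foldl_cons]

-- dict lookup after inserting every (key, f key): first (= only, keys nodup) match wins
theorem cwp_get_fold_insert (f : String → Int) :
    ∀ (keys : List String) (d : PySem.Dict String Int) (k : String), k ∉ keys →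
      ((keys.map (fun k => (k, f k))).foldl (fun d p => d.insert p.1 p.2) d).get? k = d.get? k := by
  intro keys
  induction keys with
  | nil => intro d k _; simp
  | cons x xs ih =>
    intro d k hk
    simp only [List.map_cons, List.foldl_cons]
    rw [ih _ k (by simp at hk; exact hk.2)]
    exact PySem.Dict.get?_insert_of_ne d _ (by simp at hk; exact hk.1)

theorem cwp_getD_counts (f : String → Int) :
    ∀ (keys : List String) (d : PySem.Dict String Int) (k : String), k ∈ keys → keys.Nodup →
      ((keys.map (fun k => (k, f k))).foldl (fun d p => d.insert p.1 p.2) d).getD k 0 = f k := by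
  intro keys
  induction keys with
  | nil => intro d k hk _; simp at hk
  | cons x xs ih =>
    intro d k hk hnd
    simp only [List.map_cons, List.foldl_cons]
    rcases List.mem_cons.mp hk with h | h
    · subst h
      have hnot : k ∉ xs := (List.nodup_cons.mp hnd).1
      rw [PySem.Dict.getD_eq_get?_getD, cwp_get_fold_insert f xs _ k hnot,
        PySem.Dict.get?_insert_self]
      rfl
    · exact ih _ k h (List.nodup_cons.mp hnd).2

-- ===== VERDICT (by name: the statement is the Claim_ definition above) =====
theorem count_with_prefix_py_spec : Claim_equal_count_with_prefix_py := by
  intro syllables prefix_ sample _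
  show _ = _
  unfold count_with_prefix_py count_with_prefix_py_alt
  simp only []
  -- name the pieces of B
  set keys := PySem.List.dedup (syllables.map (fun syl => prefix_ ++ syl)) with hkeys
  have hnd : keys.Nodup := PySem.List.nodup_dedup _
  -- pairs0 = zip(keys, [[0,0], ...]) is keys tagged with the initial state
  rw [show keys.zip (keys.map (fun _ => ((0 : Int), (0 : Int))))
      = keys.map (fun k => (k, ((0 : Int), (0 : Int)))) from by
    simpa using (List.zip_map' (f := @id String)
      (g := fun _ => ((0 : Int), (0 : Int))) (l := keys))]
  -- the state after the pass, keywise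
  rw [cwp_state_eq sample keys _ (fun _ => ((0 : Int), (0 : Int)))]
  set F : String → Int := fun k =>
    ((PySem.List.pyRange 0 ((PySem.Str.len sample) + 1)).foldl
      (fun st i => cwpKeyStep sample i k st) ((0 : Int), (0 : Int))).1 with hF
  -- counts.getD key 0 = F key = sample.count key, for key ∈ keys
  have hlook : ∀ k ∈ keys,
      ((keys.map (fun k => (k, (PySem.List.pyRange 0 ((PySem.Str.len sample) + 1)).foldl
          (fun st i => cwpKeyStep sample i k st) ((0 : Int), (0 : Int))))).foldl
        (fun d p => d.insert p.1 p.2.1) PySem.Dict.empty).getD k 0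
      = (PySem.Str.count sample k : Int) := by
    intro k hkmem
    have hmap : (keys.map (fun k => (k, (PySem.List.pyRange 0 ((PySem.Str.len sample) + 1)).foldl
          (fun st i => cwpKeyStep sample i k st) ((0 : Int), (0 : Int))))).foldl
        (fun d p => d.insert p.1 p.2.1) PySem.Dict.empty
        = (keys.map (fun k => (k, F k))).foldl (fun d p => d.insert p.1 p.2) PySem.Dict.empty := by
      rw [List.foldl_map, List.foldl_map]
    rw [hmap, cwp_getD_counts F keys PySem.Dict.empty k hkmem hnd, hF]
    exact cwp_key_count sample k
  -- finally: the two emission folds agree because the per-syllable counts agree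
  refine congrArg Prod.fst (PySem.List.foldl_congr_mem _ _ _ _ ?_)
  intro acc p hp
  obtain ⟨j, hj, rfl⟩ := (PySem.List.mem_enumerate_iff syllables 0 p).mp hp
  have hmem : prefix_ ++ syllables[j] ∈ keys := by
    rw [hkeys, PySem.List.mem_dedup]
    exact List.mem_map.mpr ⟨syllables[j], List.getElem_mem hj, rfl⟩
  simp only []
  rw [hlook _ hmem]
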